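-- pv_equiv track=rewrite | github.com/Frod90/coding-test-python | programmers/P72411.py | solution
-- ===== SOURCE A (Python) =====
-- from collections import defaultdict
-- from itertools import combinations
--
-- def count(order, n, dic):
--     arr = sorted(list(order))
--     for combi in combinations(arr, n):
--         st = "".join(combi)
--         dic[st] += 1
--
-- def solution(orders, course):
--     answer = []
--     for n in course:
--         dic = defaultdict(int)
--         for order in orders:
--             count(order, n, dic)
--
--         tmp = []
--         max_count = 0
--         for key in dic:
--             value = dic[key]
--             if value < 2:
--                 continue
--             if value > max_count:
--                 tmp = [key]
--                 max_count = value
--             elif value == max_count: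
--                 tmp.append(key)
--
--         for key in tmp:
--             answer.append(key)
--
--     answer.sort()
--     return answer
-- ===== SOURCE B (Python) =====
-- from itertools import combinations, groupby
--
-- def solution(orders, course):
--     # Sort-then-scan instead of hash counting: dump every combo string of every
--     # distinct size into one flat list, sort it, and read the multiplicities off
--     # as run lengths with groupby; a per-length "best" table is filled in that
--     # single scan and the answer is assembled by course lookups.
--     sizes = sorted(set(course))
--     keys = []
--     for order in orders:
--         arr = sorted(order)
--         for n in sizes:
--             for combi in combinations(arr, n):
--                 keys.append("".join(combi))
--     keys.sort()
--     best = {}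
--     for key, grp in groupby(keys):
--         c = sum(1 for _ in grp)
--         if c < 2:
--             continue
--         ln = len(key)
--         if ln not in best or c > best[ln][0]:
--             best[ln] = (c, [key])
--         elif c == best[ln][0]:
--             best[ln] = (c, best[ln][1] + [key])
--     answer = []
--     for n in course:
--         if n in best:
--             answer.extend(best[n][1])
--     answer.sort()
--     return answer
-- ===== Notes on version B (the rewrite author's own statement) =====
-- stated objective: faster
-- what changed: B replaces A's per-course-entry hash-map counting (a fresh defaultdict rebuilt, every order re-sorted and its combinations regenerated for EVERY course entry, with a running-max selection loop) by a sort-then-scan algorithm: combination strings are emitted once per DISTINCT size into one flat list, that list is sorted once, multiplicities are read off as run lengths with itertools.groupby in a single scan that fills a per-length best table, and the answer is assembled by course lookups.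
-- outside the precondition, e.g. on solution([], [-1]): A returns [], B returns []
import Mathlib
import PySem

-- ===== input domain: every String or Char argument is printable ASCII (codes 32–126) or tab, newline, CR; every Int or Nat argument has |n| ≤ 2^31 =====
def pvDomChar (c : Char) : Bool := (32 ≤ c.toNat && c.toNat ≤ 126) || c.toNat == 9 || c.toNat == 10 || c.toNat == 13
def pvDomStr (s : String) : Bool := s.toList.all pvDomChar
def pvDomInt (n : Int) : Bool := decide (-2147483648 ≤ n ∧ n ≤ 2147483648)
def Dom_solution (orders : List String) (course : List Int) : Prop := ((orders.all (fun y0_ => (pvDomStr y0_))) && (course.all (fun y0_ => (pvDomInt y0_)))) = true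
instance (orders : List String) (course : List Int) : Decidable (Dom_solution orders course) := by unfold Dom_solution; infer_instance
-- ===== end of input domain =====

-- B replaces A's per-course-size hash counting with sort-then-scan: all combo strings
-- of every distinct size go into one flat list, which is sorted once; multiplicities
-- are read off as run lengths (groupby) in a single scan that fills a per-length
-- "best" table, and the answer is assembled by course lookups.

-- ===== PORT A =====
-- `combinations(arr, n)` raises ValueError for n < 0 (those inputs are excluded by
-- Pre_solution); for 0 ≤ n, `n.toNat` is exact.
def count (order : String) (n : Int) (dic : PySem.Dict String Int) : PySem.Dict String Int :=
  let arr := PySem.List.sorted order.toList (fun c => c) false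
  (PySem.List.combinations arr n.toNat).foldl
    (fun d combi => d.modify (String.ofList combi) 0 (· + 1)) dic

def solution (orders : List String) (course : List Int) : List String :=
  let answer := course.foldl (fun answer n =>
    let dic := orders.foldl (fun d order => count order n d) PySem.Dict.empty
    let tm := dic.items.foldl
      (fun (s : List String × Int) kv =>
        if kv.2 < 2 then s
        else if kv.2 > s.2 then ([kv.1], kv.2)
        else if kv.2 = s.2 then (s.1 ++ [kv.1], s.2)
        else s)
      ([], 0)
    answer ++ tm.1) []
  PySem.List.sorted answer (fun s => s) false

-- ===== PORT B =====
-- Exact port of `for key, grp in groupby(keys): c = sum(1 for _ in grp)`: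
-- the maximal consecutive runs of the list, each with its key and run length.
def pvGroup : List String → List (String × Int)
  | [] => []
  | x :: t =>
    match pvGroup t with
    | [] => [(x, 1)]
    | (y, c) :: r => if x = y then (y, c + 1) :: r else (x, 1) :: (y, c) :: r

def solution_alt (orders : List String) (course : List Int) : List String :=
  let sizes := PySem.List.sorted (PySem.Set.ofList course) (fun x => x) false
  let keys := orders.foldl (fun keys order =>
      let arr := PySem.List.sorted order.toList (fun ch => ch) false
      sizes.foldl (fun keys n =>
        (PySem.List.combinations arr n.toNat).foldl
          (fun keys combi => keys ++ [String.ofList combi]) keys) keys) []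
  let keysS := PySem.List.sorted keys (fun s => s) false
  let best := (pvGroup keysS).foldl
    (fun (best : PySem.Dict Int (Int × List String)) (kc : String × Int) =>
      if kc.2 < 2 then best
      else
        match best.get? (PySem.Str.len kc.1) with
        | none => best.insert (PySem.Str.len kc.1) (kc.2, [kc.1])
        | some ms =>
          if kc.2 > ms.1 then best.insert (PySem.Str.len kc.1) (kc.2, [kc.1])
          else if kc.2 = ms.1 then best.insert (PySem.Str.len kc.1) (ms.1, ms.2 ++ [kc.1])
          else best)
    PySem.Dict.empty
  let answer := course.foldl (fun answer n =>
      match best.get? n with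
      | none => answer
      | some ms => answer ++ ms.2) []
  PySem.List.sorted answer (fun s => s) false

-- ===== PRECONDITION & SPEC =====
-- Pre_ excludes course lists containing a negative size: there itertools.combinations
-- raises ValueError in A (and in B) whenever at least one order exists; in the lone
-- remaining corner (no orders at all) both programs return [].
def Pre_solution (orders : List String) (course : List Int) : Prop := ∀ n ∈ course, 0 ≤ n
instance (orders : List String) (course : List Int) : Decidable (Pre_solution orders course) := by unfold Pre_solution; infer_instance
def pvWitness_solution : List String × List Int := (["ab", "ab"], [1])

def Spec_solution (orders : List String) (course : List Int) (out : List String) : Prop := out = solution_alt orders course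
instance (orders : List String) (course : List Int) (out : List String) : Decidable (Spec_solution orders course out) := by unfold Spec_solution; infer_instance

-- ===== CLAIM (what is proved, stated in full; the proofs are below) =====
def Claim_equal_solution : Prop := ∀ (orders : List String) (course : List Int), Dom_solution orders course → Pre_solution orders course → Spec_solution orders course (solution orders course)

-- ===== LEMMAS AND PROOFS =====

-- Shared vocabulary.
def pvArr (order : String) : List Char := PySem.List.sorted order.toList (fun c => c) false
def pvKeys (order : String) (n : Int) : List String :=
  (PySem.List.combinations (pvArr order) n.toNat).map String.ofList
def pvLA (orders : List String) (n : Int) : List String :=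
  (orders.map (fun o => pvKeys o n)).flatten
def pvLB (orders : List String) (sizes : List Int) : List String :=
  (orders.map (fun o => (sizes.map (fun m => pvKeys o m)).flatten)).flatten

-- A's selection machine and B's per-length machine, as named functions.
def pvAStep (s : List String × Int) (kv : String × Int) : List String × Int :=
  if kv.2 < 2 then s
  else if kv.2 > s.2 then ([kv.1], kv.2)
  else if kv.2 = s.2 then (s.1 ++ [kv.1], s.2)
  else s

def pvStep2 (s : Option (Int × List String)) (kc : String × Int) : Option (Int × List String) :=
  if kc.2 < 2 then s
  else
    match s with
    | none => some (kc.2, [kc.1])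
    | some ms =>
      if kc.2 > ms.1 then some (kc.2, [kc.1])
      else if kc.2 = ms.1 then some (ms.1, ms.2 ++ [kc.1])
      else s

def pvDStep (best : PySem.Dict Int (Int × List String)) (kc : String × Int) :
    PySem.Dict Int (Int × List String) :=
  if kc.2 < 2 then best
  else
    match best.get? (PySem.Str.len kc.1) with
    | none => best.insert (PySem.Str.len kc.1) (kc.2, [kc.1])
    | some ms =>
      if kc.2 > ms.1 then best.insert (PySem.Str.len kc.1) (kc.2, [kc.1])
      else if kc.2 = ms.1 then best.insert (PySem.Str.len kc.1) (ms.1, ms.2 ++ [kc.1])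
      else best

def pvMaxA (m : Int) (l : List (String × Int)) : Int :=
  l.foldl (fun m kc => if kc.2 < 2 then m else max m kc.2) m

def pvWinners (l : List (String × Int)) : List String :=
  (l.filter (fun kc => decide (2 ≤ kc.2) && decide (kc.2 = pvMaxA 0 l))).map Prod.fst

theorem pvKeys_len {k : String} {o : String} {m : Int} (h : k ∈ pvKeys o m) :
    k.toList.length = m.toNat := by
  simp only [pvKeys, List.mem_map] at h
  obtain ⟨c, hc, rfl⟩ := h
  simp [String.toList_ofList, PySem.List.length_of_mem_combinations hc]

theorem pvA_dict (orders : List String) (n : Int) :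
    orders.foldl (fun d order => count order n d) PySem.Dict.empty
      = PySem.Dict.counter (pvLA orders n) := by
  rw [PySem.Dict.counter_eq_foldl, pvLA, List.foldl_flatten, List.foldl_map]
  simp only [count, pvKeys, pvArr, List.foldl_map]

theorem pvB_keys (orders : List String) (sizes : List Int) :
    orders.foldl (fun keys order =>
        sizes.foldl (fun keys n =>
          (PySem.List.combinations
              (PySem.List.sorted order.toList (fun ch => ch) false) n.toNat).foldl
            (fun keys combi => keys ++ [String.ofList combi]) keys) keys) []
      = pvLB orders sizes := by
  rw [PySem.List.foldl_congr_mem orders _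
      (fun keys o => keys ++ (sizes.map (fun m => pvKeys o m)).flatten) []
      (by
        intro acc o _
        show sizes.foldl _ acc = _
        rw [PySem.List.foldl_congr_mem sizes _ (fun keys n => keys ++ pvKeys o n) acc
            (by
              intro acc2 n _
              rw [PySem.List.foldl_append_singleton_eq_map]
              rfl)]
        rw [PySem.List.foldl_append_eq_flatMap, List.flatMap_def])]
  rw [PySem.List.foldl_append_eq_flatMap, List.flatMap_def, pvLB, List.nil_append]

theorem pvFlatten_single {α : Type} (n : Int) (h : Int → List α) :
    ∀ (l : List Int), l.count n = 1 → (∀ m ∈ l, m ≠ n → h m = []) →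
      (l.map h).flatten = h n := by
  intro l
  induction l with
  | nil => intro hc; simp at hc
  | cons x t ih =>
    intro hc h0
    by_cases hx : x = n
    · subst hx
      rw [List.count_cons_self] at hc
      have ht : ∀ m ∈ t, m ≠ x → h m = [] := fun m hm => h0 m (List.mem_cons_of_mem _ hm)
      have hz : t.count x = 0 := by omega
      have : (t.map h).flatten = [] := by
        apply List.flatten_eq_nil_iff.mpr
        intro l' hl'
        obtain ⟨m, hm, rfl⟩ := List.mem_map.mp hl'
        exact ht m hm (fun he => (List.count_eq_zero.mp hz) (he ▸ hm))
      simp [this]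
    · have : h x = [] := h0 x (List.mem_cons_self) hx
      rw [List.count_cons_of_ne (by exact fun he => hx he) ] at hc
      simp only [List.map_cons, List.flatten_cons, this, List.nil_append]
      exact ih hc (fun m hm => h0 m (List.mem_cons_of_mem _ hm))

theorem pvLB_filter (orders : List String) (sizes : List Int) (n : Int)
    (hs : ∀ m ∈ sizes, 0 ≤ m) (hn : 0 ≤ n) (hc : sizes.count n = 1) :
    (pvLB orders sizes).filter (fun k => PySem.Str.len k == n) = pvLA orders n := by
  rw [pvLB, List.filter_flatten, List.map_map, pvLA]
  congr 1
  apply List.map_congr_left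
  intro o _
  simp only [Function.comp_apply, List.filter_flatten, List.map_map]
  have : ∀ m ∈ sizes, (fun l => List.filter (fun k => PySem.Str.len k == n) l) (pvKeys o m)
      = (fun m => if m = n then pvKeys o n else []) m := by
    intro m hm
    simp only []
    by_cases hmn : m = n
    · subst hmn
      rw [if_pos rfl]
      apply List.filter_eq_self.mpr
      intro k hk
      have := pvKeys_len hk
      simp [PySem.Str.len_eq, this, Int.toNat_of_nonneg (hs m hm)]
    · simp only [if_neg hmn]
      apply List.filter_eq_nil_iff.mpr
      intro k hk
      have := pvKeys_len hk
      simp only [PySem.Str.len_eq, this, beq_iff_eq]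
      have := hs m hm
      omega
  rw [show (List.filter fun k => PySem.Str.len k == n) ∘ (fun m => pvKeys o m)
        = fun m => List.filter (fun k => PySem.Str.len k == n) (pvKeys o m) from rfl,
      List.map_congr_left this]
  have h2 := pvFlatten_single n (fun m => if m = n then pvKeys o n else []) sizes hc
    (fun m _ hmn => if_neg hmn)
  simpa using h2

-- pvGroup on a weakly increasing list: distinct keys, membership = membership in
-- the list, run length = total multiplicity.
theorem pvGroup_head (x : String) (t : List String) :
    ∃ c r, pvGroup (x :: t) = (x, c) :: r := by
  rcases h : pvGroup t with _ | ⟨⟨y, c⟩, r⟩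
  · exact ⟨1, [], by simp [pvGroup, h]⟩
  · by_cases hxy : x = y
    · exact ⟨c + 1, r, by simp [pvGroup, h, hxy]⟩
    · exact ⟨1, (y, c) :: r, by simp [pvGroup, h, hxy]⟩

theorem pvGroup_char : ∀ (l : List String), l.Pairwise (· ≤ ·) →
    ((pvGroup l).map Prod.fst).Nodup ∧
    (∀ k, k ∈ (pvGroup l).map Prod.fst ↔ k ∈ l) ∧
    (∀ kc ∈ pvGroup l, kc.2 = (l.count kc.1 : Int)) := by
  intro l
  induction l with
  | nil => intro _; exact ⟨by simp [pvGroup], by simp [pvGroup], by simp [pvGroup]⟩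
  | cons x t ih =>
    intro hp
    have hx : ∀ y ∈ t, x ≤ y := (List.pairwise_cons.mp hp).1
    have ht : t.Pairwise (· ≤ ·) := (List.pairwise_cons.mp hp).2
    obtain ⟨nd, mem, cnt⟩ := ih ht
    rcases h : pvGroup t with _ | ⟨⟨y, c⟩, r⟩
    · have htnil : t = [] := by
        cases t with
        | nil => rfl
        | cons z t' =>
          obtain ⟨c, r, hzr⟩ := pvGroup_head z t'
          rw [hzr] at h; cases h
      subst htnil
      refine ⟨by simp [pvGroup], by simp [pvGroup], ?_⟩
      intro kc hkc
      simp only [pvGroup] at hkc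
      rw [List.mem_singleton] at hkc
      subst hkc
      simp
    · have hty : ∃ t'', t = y :: t'' := by
        cases t with
        | nil => rw [show pvGroup [] = [] from rfl] at h; cases h
        | cons z t' =>
          obtain ⟨c', r', hzr⟩ := pvGroup_head z t'
          rw [hzr] at h
          injection h with h1 h2
          injection h1 with h3 h4
          exact ⟨t', by rw [h3]⟩
      obtain ⟨t'', rfl⟩ := hty
      rw [h] at nd mem cnt
      by_cases hxy : x = y
      · have hres : pvGroup (x :: y :: t'') = (y, c + 1) :: r := by
          have e : pvGroup (x :: y :: t'') = match pvGroup (y :: t'') with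
            | [] => [(x, 1)]
            | (z, c) :: r => if x = z then (z, c + 1) :: r else (x, 1) :: (z, c) :: r := rfl
          rw [e, h]
          simp [hxy]
        subst hxy
        have hccnt : c = ((x :: t'').count x : Int) := cnt (x, c) List.mem_cons_self
        refine ⟨?_, ?_, ?_⟩
        · rw [hres]; simpa using nd
        · intro k
          rw [hres]
          simp only [List.map_cons] at mem ⊢
          rw [mem k]
          simp
        · intro kc hkc
          rw [hres] at hkc
          rcases List.mem_cons.mp hkc with rfl | hkc'
          · show c + 1 = (List.count x (x :: x :: t'') : Int)
            rw [List.count_cons_self]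
            push_cast
            omega
          · have h2 := cnt kc (List.mem_cons_of_mem _ hkc')
            have hkcy : kc.1 ≠ x := by
              intro he
              have : kc.1 ∈ r.map Prod.fst := List.mem_map_of_mem hkc'
              simp only [List.map_cons, List.nodup_cons] at nd
              exact nd.1 (he ▸ this)
            rw [h2]
            have hne := Ne.symm hkcy
            simp [List.count_cons_of_ne hne]
      · have hres : pvGroup (x :: y :: t'') = (x, 1) :: (y, c) :: r := by
          have e : pvGroup (x :: y :: t'') = match pvGroup (y :: t'') with
            | [] => [(x, 1)]
            | (z, c) :: r => if x = z then (z, c + 1) :: r else (x, 1) :: (z, c) :: r := rfl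
          rw [e, h]
          simp [hxy]
        have hxle : x ≤ y := hx y List.mem_cons_self
        have hxnott : x ∉ y :: t'' := by
          intro hmem
          rcases List.mem_cons.mp hmem with rfl | hmem'
          · exact hxy rfl
          · have h1 : y ≤ x := (List.pairwise_cons.mp ht).1 x hmem'
            exact hxy (le_antisymm hxle h1)
        refine ⟨?_, ?_, ?_⟩
        · rw [hres]
          simp only [List.map_cons, List.nodup_cons] at nd ⊢
          refine ⟨?_, nd⟩
          intro hmem
          apply hxnott
          exact (mem x).mp (by simpa using hmem)
        · intro k
          rw [hres]
          simp only [List.map_cons] at mem ⊢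
          have := mem k
          simp only [List.mem_cons] at this ⊢
          tauto
        · intro kc hkc
          rw [hres] at hkc
          rcases List.mem_cons.mp hkc with rfl | hkc'
          · show (1 : Int) = (List.count x (x :: y :: t'') : Int)
            rw [List.count_cons_self, List.count_eq_zero.mpr hxnott]
            norm_num
          · have h2 := cnt kc hkc'
            have hkcne : kc.1 ≠ x := by
              intro he
              apply hxnott
              rw [← he]
              exact (mem kc.1).mp (List.mem_map_of_mem hkc')
            rw [h2]
            have hne := Ne.symm hkcne
            simp [List.count_cons_of_ne hne]

theorem pvEqMapFst {l : List (String × Int)} (f : String → String × Int)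
    (h : ∀ kc ∈ l, kc = f kc.1) : l = (l.map Prod.fst).map f := by
  induction l with
  | nil => rfl
  | cons kc t ih =>
    simp only [List.map_cons]
    rw [← h kc List.mem_cons_self, ← ih (fun kc' h' => h kc' (List.mem_cons_of_mem _ h'))]

-- The dict fold, read at one key n, is the per-length machine over the entries of
-- that length.
theorem pvStep2_skip (s : Option (Int × List String)) (kc : String × Int) (h : kc.2 < 2) :
    pvStep2 s kc = s := if_pos h

theorem pvStep2_none (kc : String × Int) (h : ¬ kc.2 < 2) :
    pvStep2 none kc = some (kc.2, [kc.1]) := by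
  simp only [pvStep2, if_neg h]

theorem pvStep2_gt (ms : Int × List String) (kc : String × Int) (h : ¬ kc.2 < 2)
    (hgt : kc.2 > ms.1) : pvStep2 (some ms) kc = some (kc.2, [kc.1]) := by
  simp only [pvStep2, if_neg h]
  rw [if_pos hgt]

theorem pvStep2_eq (ms : Int × List String) (kc : String × Int) (h : ¬ kc.2 < 2)
    (hgt : ¬ kc.2 > ms.1) (heq : kc.2 = ms.1) :
    pvStep2 (some ms) kc = some (ms.1, ms.2 ++ [kc.1]) := by
  simp only [pvStep2, if_neg h]
  rw [if_neg hgt, if_pos heq]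

theorem pvStep2_else (ms : Int × List String) (kc : String × Int) (h : ¬ kc.2 < 2)
    (hgt : ¬ kc.2 > ms.1) (heq : ¬ kc.2 = ms.1) : pvStep2 (some ms) kc = some ms := by
  simp only [pvStep2, if_neg h]
  rw [if_neg hgt, if_neg heq]

theorem pvAStep_skip (s : List String × Int) (kv : String × Int) (h : kv.2 < 2) :
    pvAStep s kv = s := if_pos h

theorem pvAStep_gt (s : List String × Int) (kv : String × Int) (h : ¬ kv.2 < 2)
    (hgt : kv.2 > s.2) : pvAStep s kv = ([kv.1], kv.2) := by
  simp only [pvAStep, if_neg h]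
  rw [if_pos hgt]

theorem pvAStep_eq (s : List String × Int) (kv : String × Int) (h : ¬ kv.2 < 2)
    (hgt : ¬ kv.2 > s.2) (heq : kv.2 = s.2) : pvAStep s kv = (s.1 ++ [kv.1], s.2) := by
  simp only [pvAStep, if_neg h]
  rw [if_neg hgt, if_pos heq]

theorem pvAStep_else (s : List String × Int) (kv : String × Int) (h : ¬ kv.2 < 2)
    (hgt : ¬ kv.2 > s.2) (heq : ¬ kv.2 = s.2) : pvAStep s kv = s := by
  simp only [pvAStep, if_neg h]
  rw [if_neg hgt, if_neg heq]

theorem pvBest_get (L : List (String × Int)) (n : Int) :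
    ∀ (d : PySem.Dict Int (Int × List String)),
      (L.foldl pvDStep d).get? n
        = (L.filter (fun kc => PySem.Str.len kc.1 == n)).foldl pvStep2 (d.get? n) := by
  induction L with
  | nil => intro d; rfl
  | cons kc t ih =>
    intro d
    simp only [List.foldl_cons, List.filter_cons]
    by_cases hlen : PySem.Str.len kc.1 = n
    · subst hlen
      rw [show (PySem.Str.len kc.1 == PySem.Str.len kc.1) = true from beq_self_eq_true _,
          if_pos rfl]
      simp only [List.foldl_cons]
      by_cases h2 : kc.2 < 2
      · rw [show pvDStep d kc = d from if_pos h2, pvStep2_skip _ _ h2]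
        exact ih d
      · rcases hg : d.get? (PySem.Str.len kc.1) with _ | ms
        · rw [show pvDStep d kc = d.insert (PySem.Str.len kc.1) (kc.2, [kc.1]) by
                simp only [pvDStep, if_neg h2, hg],
              pvStep2_none _ h2, ih, PySem.Dict.get?_insert_self]
        · by_cases hgt : kc.2 > ms.1
          · rw [show pvDStep d kc = d.insert (PySem.Str.len kc.1) (kc.2, [kc.1]) by
                  simp only [pvDStep, if_neg h2, hg]; rw [if_pos hgt],
                pvStep2_gt _ _ h2 hgt, ih, PySem.Dict.get?_insert_self]
          · by_cases heq : kc.2 = ms.1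
            · rw [show pvDStep d kc = d.insert (PySem.Str.len kc.1) (ms.1, ms.2 ++ [kc.1]) by
                    simp only [pvDStep, if_neg h2, hg]; rw [if_neg hgt, if_pos heq],
                  pvStep2_eq _ _ h2 hgt heq, ih, PySem.Dict.get?_insert_self]
            · rw [show pvDStep d kc = d by
                    simp only [pvDStep, if_neg h2, hg]; rw [if_neg hgt, if_neg heq],
                  pvStep2_else _ _ h2 hgt heq, ih, hg]
    · rw [show (PySem.Str.len kc.1 == n) = false by simpa using hlen, if_neg (by simp)]
      have hget : (pvDStep d kc).get? n = d.get? n := by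
        simp only [pvDStep]
        split
        · rfl
        · split
          · exact PySem.Dict.get?_insert_of_ne d _ (fun he => hlen he.symm)
          · split_ifs
            · exact PySem.Dict.get?_insert_of_ne d _ (fun he => hlen he.symm)
            · exact PySem.Dict.get?_insert_of_ne d _ (fun he => hlen he.symm)
            · rfl
      rw [ih, hget]

theorem pvAStep_snd_mono (L : List (String × Int)) :
    ∀ s : List String × Int, s.2 ≤ (L.foldl pvAStep s).2 := by
  induction L with
  | nil => intro s; simp
  | cons kv t ih =>
    intro s
    rw [List.foldl_cons]
    refine le_trans ?_ (ih (pvAStep s kv))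
    simp only [pvAStep]
    split_ifs <;> simp <;> omega

theorem pvRel (L : List (String × Int)) :
    ∀ (tmp : List String) (m : Int), 2 ≤ m →
      L.foldl pvStep2 (some (m, tmp))
        = some ((L.foldl pvAStep (tmp, m)).2, (L.foldl pvAStep (tmp, m)).1) := by
  induction L with
  | nil => intro tmp m hm; rfl
  | cons kc t ih =>
    intro tmp m hm
    simp only [List.foldl_cons]
    by_cases h2 : kc.2 < 2
    · rw [pvStep2_skip _ _ h2, pvAStep_skip _ _ h2]
      exact ih tmp m hm
    · by_cases hgt : kc.2 > m
      · rw [pvStep2_gt (m, tmp) _ h2 hgt, pvAStep_gt (tmp, m) _ h2 hgt]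
        exact ih [kc.1] kc.2 (by omega)
      · by_cases heq : kc.2 = m
        · rw [pvStep2_eq (m, tmp) _ h2 hgt heq, pvAStep_eq (tmp, m) _ h2 hgt heq]
          exact ih (tmp ++ [kc.1]) m hm
        · rw [pvStep2_else (m, tmp) _ h2 hgt heq, pvAStep_else (tmp, m) _ h2 hgt heq]
          exact ih tmp m hm

theorem pvStart (L : List (String × Int)) :
    L.foldl pvStep2 none
      = (if (L.foldl pvAStep ([], 0)).2 = 0 then none
         else some ((L.foldl pvAStep ([], 0)).2, (L.foldl pvAStep ([], 0)).1)) := by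
  induction L with
  | nil => rfl
  | cons kc t ih =>
    simp only [List.foldl_cons]
    by_cases h2 : kc.2 < 2
    · rw [pvStep2_skip _ _ h2, pvAStep_skip _ _ h2]
      exact ih
    · rw [pvStep2_none _ h2,
          show pvAStep ([], 0) kc = ([kc.1], kc.2) from
            pvAStep_gt ([], 0) _ h2 (by simp only []; omega),
          pvRel t [kc.1] kc.2 (by omega)]
      have hmono := pvAStep_snd_mono t ([kc.1], kc.2)
      rw [if_neg (by simp only [] at hmono ⊢; omega)]

theorem pvLe_maxA (l : List (String × Int)) : ∀ m : Int, m ≤ pvMaxA m l := by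
  induction l with
  | nil => intro m; simp [pvMaxA]
  | cons x t ih =>
    intro m
    simp only [pvMaxA, List.foldl_cons]
    split
    · exact ih m
    · exact le_trans (le_max_left m x.2) (ih _)

theorem pvMaxA_filter (l : List (String × Int)) : ∀ m : Int,
    pvMaxA m l = (l.filter (fun kc => decide (2 ≤ kc.2))).foldl (fun m kc => max m kc.2) m := by
  induction l with
  | nil => intro m; rfl
  | cons x t ih =>
    intro m
    by_cases hx : x.2 < 2
    · rw [show List.filter (fun kc => decide (2 ≤ kc.2)) (x :: t)
          = List.filter (fun kc => decide (2 ≤ kc.2)) t by simp [List.filter_cons]; omega]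
      have hM : pvMaxA m (x :: t) = pvMaxA m t := by
        unfold pvMaxA; rw [List.foldl_cons, if_pos hx]
      rw [hM]; exact ih m
    · rw [show List.filter (fun kc => decide (2 ≤ kc.2)) (x :: t)
          = x :: List.filter (fun kc => decide (2 ≤ kc.2)) t by simp [List.filter_cons]; omega]
      have hM : pvMaxA m (x :: t) = pvMaxA (max m x.2) t := by
        unfold pvMaxA; rw [List.foldl_cons, if_neg hx]
      rw [hM, List.foldl_cons]; exact ih (max m x.2)

theorem pvRun (l : List (String × Int)) : ∀ (tmp : List String) (m : Int),
    l.foldl pvAStep (tmp, m)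
      = ((if pvMaxA m l = m then tmp else []) ++
          (l.filter (fun kc => decide (2 ≤ kc.2) && decide (kc.2 = pvMaxA m l))).map Prod.fst,
         pvMaxA m l) := by
  induction l with
  | nil => intro tmp m; simp [pvMaxA]
  | cons x t ih =>
    intro tmp m
    simp only [List.foldl_cons, pvAStep]
    by_cases h2 : x.2 < 2
    · rw [if_pos h2]
      rw [show pvMaxA m (x :: t) = pvMaxA m t by unfold pvMaxA; rw [List.foldl_cons, if_pos h2]]
      rw [show List.filter (fun kc => decide (2 ≤ kc.2) && decide (kc.2 = pvMaxA m t)) (x :: t)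
          = List.filter (fun kc => decide (2 ≤ kc.2) && decide (kc.2 = pvMaxA m t)) t by
            simp [List.filter_cons]; omega]
      exact ih tmp m
    · rw [if_neg h2]
      have hmx : pvMaxA m (x :: t) = pvMaxA (max m x.2) t := by
        unfold pvMaxA; rw [List.foldl_cons, if_neg h2]
      by_cases hgt : x.2 > m
      · rw [if_pos hgt]
        have hmax : max m x.2 = x.2 := by omega
        have hM : pvMaxA m (x :: t) = pvMaxA x.2 t := by rw [hmx, hmax]
        have hge : x.2 ≤ pvMaxA x.2 t := pvLe_maxA t x.2
        rw [ih [x.1] x.2, hM]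
        have hne : pvMaxA x.2 t ≠ m := by omega
        rw [if_neg hne, List.filter_cons]
        by_cases heq : x.2 = pvMaxA x.2 t
        · rw [if_pos heq.symm,
            show (decide (2 ≤ x.2) && decide (x.2 = pvMaxA x.2 t)) = true by
              simp only [Bool.and_eq_true, decide_eq_true_eq]; exact ⟨by omega, heq⟩]
          simp
        · rw [if_neg (fun h => heq h.symm),
            show (decide (2 ≤ x.2) && decide (x.2 = pvMaxA x.2 t)) = false by
              simp only [Bool.and_eq_false_iff, decide_eq_false_iff_not]; right; exact heq]
          simp
      · rw [if_neg hgt]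
        by_cases heq : x.2 = m
        · rw [if_pos heq]
          have hmax : max m x.2 = m := by omega
          have hM : pvMaxA m (x :: t) = pvMaxA m t := by rw [hmx, hmax, pvMaxA]
          rw [ih (tmp ++ [x.1]) m, hM, List.filter_cons]
          by_cases hMm : pvMaxA m t = m
          · rw [if_pos hMm, if_pos hMm]
            rw [show (decide (2 ≤ x.2) && decide (x.2 = pvMaxA m t)) = true by
              simp; constructor; omega; omega]
            simp
          · rw [if_neg hMm, if_neg hMm]
            rw [show (decide (2 ≤ x.2) && decide (x.2 = pvMaxA m t)) = false by
              simp; intro; omega]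
            simp
        · rw [if_neg heq]
          have hlt : x.2 < m := by omega
          have hmax : max m x.2 = m := by omega
          have hM : pvMaxA m (x :: t) = pvMaxA m t := by rw [hmx, hmax, pvMaxA]
          rw [ih tmp m, hM, List.filter_cons]
          have hge : m ≤ pvMaxA m t := pvLe_maxA t m
          rw [show (decide (2 ≤ x.2) && decide (x.2 = pvMaxA m t)) = false by
            simp; intro; omega]
          simp

theorem pvFoldlMax_perm {l₁ l₂ : List (String × Int)} (h : l₁.Perm l₂) :
    ∀ m : Int, l₁.foldl (fun acc kc => max acc kc.2) m = l₂.foldl (fun acc kc => max acc kc.2) m := by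
  induction h with
  | nil => intro m; rfl
  | cons x h ih => intro m; simp only [List.foldl_cons]; exact ih _
  | swap x y l => intro m; simp only [List.foldl_cons, max_right_comm]
  | trans h₁ h₂ ih₁ ih₂ => intro m; rw [ih₁, ih₂]

theorem pvMaxA_perm {l₁ l₂ : List (String × Int)} (h : l₁.Perm l₂) (m : Int) :
    pvMaxA m l₁ = pvMaxA m l₂ := by
  rw [pvMaxA_filter, pvMaxA_filter]
  exact pvFoldlMax_perm (h.filter _) m

theorem pvWinners_perm {l₁ l₂ : List (String × Int)} (h : l₁.Perm l₂) :
    (pvWinners l₁).Perm (pvWinners l₂) := by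
  unfold pvWinners
  rw [pvMaxA_perm h 0]
  exact (h.filter _).map Prod.fst

theorem pvFlatMap_perm {f g : Int → List String} :
    ∀ (l : List Int), (∀ x ∈ l, (f x).Perm (g x)) → (l.flatMap f).Perm (l.flatMap g) := by
  intro l
  induction l with
  | nil => intro _; rfl
  | cons x t ih =>
    intro h
    simp only [List.flatMap_cons]
    exact (h x List.mem_cons_self).append (ih (fun y hy => h y (List.mem_cons_of_mem _ hy)))

-- The two per-size entry lists are permutations of one another.
theorem pvEntries_perm (orders : List String) (sizes : List Int) (n : Int)
    (hs : ∀ m ∈ sizes, 0 ≤ m) (hn : 0 ≤ n) (hc : sizes.count n = 1) :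
    ((pvGroup (PySem.List.sorted (pvLB orders sizes) (fun s => s) false)).filter
        (fun kc => PySem.Str.len kc.1 == n)).Perm
      ((PySem.Set.ofList (pvLA orders n)).map
        (fun k => (k, ((pvLA orders n).count k : Int)))) := by
  have hperm : (PySem.List.sorted (pvLB orders sizes) (fun s => s) false).Perm
      (pvLB orders sizes) := PySem.List.sorted_perm _ _ _
  have hpw : (PySem.List.sorted (pvLB orders sizes) (fun s => s) false).Pairwise (· ≤ ·) :=
    PySem.List.sorted_pairwise _ _
  obtain ⟨nd, mem, cnt⟩ := pvGroup_char _ hpw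
  have hrepr : pvGroup (PySem.List.sorted (pvLB orders sizes) (fun s => s) false)
      = ((pvGroup (PySem.List.sorted (pvLB orders sizes) (fun s => s) false)).map Prod.fst).map
          (fun k => (k, ((PySem.List.sorted (pvLB orders sizes) (fun s => s) false).count k : Int))) :=
    pvEqMapFst _ (fun kc hkc => by rw [← cnt kc hkc])
  rw [hrepr, List.filter_map]
  have hnd' : (((pvGroup (PySem.List.sorted (pvLB orders sizes) (fun s => s) false)).map
      Prod.fst).filter (fun k => PySem.Str.len k == n)).Nodup := nd.filter _
  have hndA : (PySem.Set.ofList (pvLA orders n) : List String).Nodup :=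
    PySem.Set.nodup_ofList _
  have hmemK : ∀ k, k ∈ ((pvGroup (PySem.List.sorted (pvLB orders sizes) (fun s => s) false)).map
      Prod.fst).filter (fun k => PySem.Str.len k == n) ↔ k ∈ pvLA orders n := by
    intro k
    rw [List.mem_filter, mem k, hperm.mem_iff, ← pvLB_filter orders sizes n hs hn hc,
        List.mem_filter]
  have hpermK : (((pvGroup (PySem.List.sorted (pvLB orders sizes) (fun s => s) false)).map
      Prod.fst).filter (fun k => PySem.Str.len k == n)).Perm
      (PySem.Set.ofList (pvLA orders n)) :=
    (List.perm_ext_iff_of_nodup hnd' hndA).mpr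
      (fun k => (hmemK k).trans (PySem.Set.mem_ofList _ _).symm)
  have hcnt : ∀ k ∈ ((pvGroup (PySem.List.sorted (pvLB orders sizes) (fun s => s) false)).map
      Prod.fst).filter (fun k => PySem.Str.len k == n),
      ((PySem.List.sorted (pvLB orders sizes) (fun s => s) false).count k : Int)
        = ((pvLA orders n).count k : Int) := by
    intro k hk
    have hlenk : (PySem.Str.len k == n) = true := (List.mem_filter.mp hk).2
    rw [hperm.count_eq, ← pvLB_filter orders sizes n hs hn hc,
        List.count_filter (p := fun k => PySem.Str.len k == n) hlenk]
  rw [List.map_congr_left (fun k hk => by rw [hcnt k hk])]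
  exact hpermK.map _

-- Per course entry, A's winners and B's table entry are permutations.
theorem pvPerN_perm (orders : List String) (sizes : List Int) (n : Int)
    (hs : ∀ m ∈ sizes, 0 ≤ m) (hn : 0 ≤ n) (hc : sizes.count n = 1) :
    (((PySem.Dict.counter (pvLA orders n) : PySem.Dict String Int).items.foldl
        pvAStep ([], 0)).1).Perm
      (match ((pvGroup (PySem.List.sorted (pvLB orders sizes) (fun s => s) false)).foldl
          pvDStep PySem.Dict.empty).get? n with
       | none => []
       | some ms => ms.2) := by
  rw [pvBest_get _ n PySem.Dict.empty, PySem.Dict.get?_empty, pvStart]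
  have hperm := pvEntries_perm orders sizes n hs hn hc
  have hM := pvMaxA_perm hperm 0
  rw [PySem.Dict.items_counter, pvRun, pvRun]
  simp only [ite_self, List.nil_append]
  by_cases hz : pvMaxA 0 ((PySem.Set.ofList (pvLA orders n)).map
      (fun k => (k, ((pvLA orders n).count k : Int)))) = 0
  · rw [if_pos (by rw [hM, hz])]
    have hnil : ((PySem.Set.ofList (pvLA orders n)).map
        (fun k => (k, ((pvLA orders n).count k : Int)))).filter
          (fun kc => decide (2 ≤ kc.2) && decide (kc.2 = pvMaxA 0
            ((PySem.Set.ofList (pvLA orders n)).map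
              (fun k => (k, ((pvLA orders n).count k : Int)))))) = [] := by
      apply List.filter_eq_nil_iff.mpr
      intro kc _
      simp only [Bool.and_eq_true, decide_eq_true_eq, not_and]
      intro h2 he
      omega
    rw [hnil]
    simp
  · rw [if_neg (by rw [hM]; exact hz)]
    exact pvWinners_perm hperm.symm

def pvWA (orders : List String) (n : Int) : List String :=
  ((PySem.Dict.counter (pvLA orders n) : PySem.Dict String Int).items.foldl pvAStep ([], 0)).1

def pvWB (orders : List String) (sizes : List Int) (n : Int) : List String :=
  match ((pvGroup (PySem.List.sorted (pvLB orders sizes) (fun s => s) false)).foldl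
      pvDStep PySem.Dict.empty).get? n with
  | none => []
  | some ms => ms.2

theorem pvBodyB (orders : List String) (sizes : List Int) (acc : List String) (n : Int) :
    (match ((pvGroup (PySem.List.sorted (pvLB orders sizes) (fun s => s) false)).foldl
        pvDStep PySem.Dict.empty).get? n with
     | none => acc
     | some ms => acc ++ ms.2) = acc ++ pvWB orders sizes n := by
  unfold pvWB
  cases ((pvGroup (PySem.List.sorted (pvLB orders sizes) (fun s => s) false)).foldl
      pvDStep PySem.Dict.empty).get? n <;> simp

-- ===== VERDICT (by name: the statement is the Claim_ definition above) =====
theorem solution_spec : Claim_equal_solution := by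
  intro orders course _ hpre
  unfold Spec_solution solution solution_alt
  dsimp only
  have hmemsz : ∀ m : Int, m ∈ PySem.List.sorted (PySem.Set.ofList course) (fun x => x) false
      ↔ m ∈ course := by
    intro m
    rw [PySem.List.mem_sorted, PySem.Set.mem_ofList]
  have hsz : ∀ m ∈ PySem.List.sorted (PySem.Set.ofList course) (fun x => x) false, 0 ≤ m :=
    fun m hm => hpre m ((hmemsz m).mp hm)
  have hnd : (PySem.List.sorted (PySem.Set.ofList course) (fun x => x) false).Nodup :=
    ((PySem.List.sorted_perm _ _ _).nodup_iff).mpr (PySem.Set.nodup_ofList _)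
  have hcount : ∀ n ∈ course,
      (PySem.List.sorted (PySem.Set.ofList course) (fun x => x) false).count n = 1 :=
    fun n hn => List.count_eq_one_of_mem hnd ((hmemsz n).mpr hn)
  rw [pvB_keys orders (PySem.List.sorted (PySem.Set.ofList course) (fun x => x) false)]
  conv_lhs => rw [PySem.List.foldl_congr_mem course _ (fun acc n => acc ++ pvWA orders n) []
      (by
        intro acc n _
        show acc ++ ((orders.foldl (fun d order => count order n d)
            PySem.Dict.empty).items.foldl pvAStep ([], 0)).1 = acc ++ pvWA orders n
        rw [pvWA, pvA_dict])]
  rw [PySem.List.foldl_append_eq_flatMap, List.nil_append]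
  refine Eq.trans ((PySem.List.sorted_id_eq_sorted_id_iff_perm _ _).mpr
      (pvFlatMap_perm course (fun n hn =>
        pvPerN_perm orders _ n hsz (hpre n hn) (hcount n hn)))) ?_
  symm
  apply congrArg (fun l => PySem.List.sorted l (fun s => s) false)
  refine Eq.trans (PySem.List.foldl_congr_mem course _
      (fun acc n => acc ++ pvWB orders
        (PySem.List.sorted (PySem.Set.ofList course) (fun x => x) false) n) []
      (fun acc n _ => pvBodyB orders
        (PySem.List.sorted (PySem.Set.ofList course) (fun x => x) false) acc n)) ?_
  rw [PySem.List.foldl_append_eq_flatMap, List.nil_append]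
  rfl
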